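-- pv_equiv track=rewrite | github.com/deepomicslab/LocalHGT | paper_results/mechanism.py | extract_insertion
-- ===== SOURCE A (Python) =====
-- def extract_insertion(ref_alignment):
--     insertion_list = []
--     insertion_length = 0
--     insertion_flag = False
--     for i in range(1, len(ref_alignment)-1):
--         if ref_alignment[i -1] != "-" and ref_alignment[i] == "-":
--             insertion_length = 1
--             insertion_flag = True
--         elif insertion_flag and ref_alignment[i] == "-":
--             insertion_length += 1
--         elif insertion_flag and ref_alignment[i] != "-":
--             insertion_list.append(insertion_length)
--             insertion_flag = False
--             insertion_length = 0
--     # print (insertion_list)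
--     return insertion_list
-- ===== SOURCE B (Python) =====
-- def extract_insertion(ref_alignment):
--     n = len(ref_alignment)
--     runs = []
--     a = 0
--     while a < n:
--         if ref_alignment[a] == '-':
--             b = a
--             while b + 1 < n and ref_alignment[b + 1] == '-':
--                 b += 1
--             runs.append((a, b))
--             a = b + 1
--         else:
--             a += 1
--     return [b - a + 1 for (a, b) in runs if a >= 1 and b <= n - 3]
-- ===== Notes on version B (the rewrite author's own statement) =====
-- stated objective: alternative
-- what changed: Replaces A's single-pass character state machine (flag/length registers) with a two-phase group-then-filter design: first collect all maximal '-' runs as (start,end) spans with an explicit span scanner, then keep the lengths of the runs with start >= 1 and end <= n-3.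
import Mathlib
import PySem

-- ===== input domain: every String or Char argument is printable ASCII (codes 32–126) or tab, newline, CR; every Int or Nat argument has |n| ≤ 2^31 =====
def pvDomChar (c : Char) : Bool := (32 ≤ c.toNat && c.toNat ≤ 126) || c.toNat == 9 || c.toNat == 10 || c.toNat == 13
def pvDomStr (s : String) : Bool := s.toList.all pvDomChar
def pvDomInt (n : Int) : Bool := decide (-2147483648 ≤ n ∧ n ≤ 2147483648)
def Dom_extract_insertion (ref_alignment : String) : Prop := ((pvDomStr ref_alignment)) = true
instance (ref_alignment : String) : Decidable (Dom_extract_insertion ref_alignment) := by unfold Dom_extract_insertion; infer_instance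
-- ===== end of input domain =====

-- B replaces A's one-pass flag/length state machine by a two-phase design: collect the maximal
-- '-' runs as (start,end) spans, then keep the lengths of the runs with start ≥ 1 and
-- end ≤ n-3 (alternative decomposition, same cost).

-- ===== PORT A =====
-- A's for-loop over range(1, n-1) as structural recursion over the index; every character
-- access in the loop has index in 0..n-1, so getD with a dummy default ' ' is exact here.
def aLoop (l : List Char) (stop i : Nat) (acc : List Int) (len : Int) (flag : Bool) : List Int :=
  if i < stop then
    if l.getD (i-1) ' ' ≠ '-' ∧ l.getD i ' ' = '-' then
      aLoop l stop (i+1) acc 1 true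
    else if flag ∧ l.getD i ' ' = '-' then
      aLoop l stop (i+1) acc (len+1) flag
    else if flag ∧ l.getD i ' ' ≠ '-' then
      aLoop l stop (i+1) (acc ++ [len]) 0 false
    else
      aLoop l stop (i+1) acc len flag
  else acc
termination_by stop - i

def extract_insertion (ref_alignment : String) : List Int :=
  aLoop ref_alignment.toList (ref_alignment.toList.length - 1) 1 [] 0 false

-- ===== PORT B =====
-- inner while loop of Source B: extend a '-' run rightwards from b
def extendRun (l : List Char) (b : Nat) : Nat :=
  if b + 1 < l.length ∧ l.getD (b+1) ' ' = '-' then extendRun l (b+1) else b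
termination_by l.length - b

-- termination fact for runsFrom (cited in its decreasing_by)
theorem extendRun_ge (l : List Char) : ∀ k b, l.length - b ≤ k → b ≤ extendRun l b := by
  intro k
  induction k with
  | zero => intro b hb; rw [extendRun]; split_ifs with h <;> omega
  | succ k ih =>
    intro b hb; rw [extendRun]; split_ifs with h
    · have := ih (b+1) (by omega); omega
    · omega

-- outer while loop of Source B: all maximal '-' runs from position a on, as (start,end) spans
def runsFrom (l : List Char) (a : Nat) : List (Nat × Nat) :=
  if a < l.length then
    if l.getD a ' ' = '-' then
      (a, extendRun l a) :: runsFrom l (extendRun l a + 1)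
    else runsFrom l (a + 1)
  else []
termination_by l.length - a
decreasing_by
  · have := extendRun_ge l (l.length - a) a (by omega); omega
  · omega

def extract_insertion_alt (ref_alignment : String) : List Int :=
  let l := ref_alignment.toList
  let n := l.length
  ((runsFrom l 0).filter (fun p => decide (1 ≤ p.1 ∧ (p.2 : Int) ≤ (n : Int) - 3))).map
    (fun p => (p.2 : Int) - (p.1 : Int) + 1)

-- ===== PRECONDITION & SPEC =====
def Spec_extract_insertion (ref_alignment : String) (out : List Int) : Prop := out = extract_insertion_alt ref_alignment
instance (ref_alignment : String) (out : List Int) : Decidable (Spec_extract_insertion ref_alignment out) := by unfold Spec_extract_insertion; infer_instance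

-- ===== CLAIM (what is proved, stated in full; the proofs are below) =====
def Claim_equal_extract_insertion : Prop := ∀ (ref_alignment : String), Dom_extract_insertion ref_alignment → Spec_extract_insertion ref_alignment (extract_insertion ref_alignment)

-- ===== LEMMAS AND PROOFS =====

-- render B's run list as the final answer (the list comprehension of Source B)
def renderF (n : Nat) (ps : List (Nat × Nat)) : List Int :=
  (ps.filter (fun p => decide (1 ≤ p.1 ∧ (p.2 : Int) ≤ (n : Int) - 3))).map
    (fun p => (p.2 : Int) - (p.1 : Int) + 1)

theorem renderF_cons (n a b : Nat) (ps : List (Nat × Nat)) :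
    renderF n ((a, b) :: ps)
      = (if 1 ≤ a ∧ (b : Int) ≤ (n : Int) - 3 then [(b : Int) - (a : Int) + 1] else [])
          ++ renderF n ps := by
  by_cases h : 1 ≤ a ∧ (b : Int) ≤ (n : Int) - 3
  · simp [renderF, h]
  · simp [renderF, h]

theorem extendRun_lt (l : List Char) : ∀ k b, l.length - b ≤ k → b < l.length →
    extendRun l b < l.length := by
  intro k
  induction k with
  | zero => intro b hb hlt; rw [extendRun]; split_ifs with h <;> omega
  | succ k ih =>
    intro b hb hlt; rw [extendRun]; split_ifs with h
    · exact ih (b+1) (by omega) h.1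
    · exact hlt

theorem extendRun_stop (l : List Char) : ∀ k b, l.length - b ≤ k →
    ¬ (extendRun l b + 1 < l.length ∧ l.getD (extendRun l b + 1) ' ' = '-') := by
  intro k
  induction k with
  | zero =>
    intro b hb; rw [extendRun]; split_ifs with h
    · omega
    · exact h
  | succ k ih =>
    intro b hb; rw [extendRun]; split_ifs with h
    · exact ih (b+1) (by omega)
    · exact h

theorem extendRun_stop' (l : List Char) (b : Nat) :
    ¬ (extendRun l b + 1 < l.length ∧ l.getD (extendRun l b + 1) ' ' = '-') :=
  extendRun_stop l (l.length - b) b le_rfl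

theorem extendRun_step (l : List Char) (b : Nat) (h1 : b + 1 < l.length)
    (h2 : l.getD (b+1) ' ' = '-') : extendRun l b = extendRun l (b+1) := by
  conv_lhs => rw [extendRun]
  rw [if_pos ⟨h1, h2⟩]

theorem extendRun_fix (l : List Char) (b : Nat)
    (h : ¬ (b + 1 < l.length ∧ l.getD (b+1) ' ' = '-')) : extendRun l b = b := by
  rw [extendRun, if_neg h]

theorem lt_of_getD_dash (l : List Char) (i : Nat) (h : l.getD i ' ' = '-') : i < l.length := by
  by_contra hc
  rw [List.getD_eq_default _ _ (by omega)] at h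
  exact absurd h (by decide)

theorem runsFrom_nil (l : List Char) (j : Nat) (h : l.length ≤ j) : runsFrom l j = [] := by
  rw [runsFrom, if_neg (by omega)]

theorem runsFrom_skip (l : List Char) (b : Nat)
    (h : ¬ (b + 1 < l.length ∧ l.getD (b+1) ' ' = '-')) :
    runsFrom l (b+1) = runsFrom l (b+2) := by
  by_cases hl : b + 1 < l.length
  · have hc : l.getD (b+1) ' ' ≠ '-' := fun hd => h ⟨hl, hd⟩
    conv_lhs => rw [runsFrom]
    rw [if_pos hl, if_neg hc]
  · rw [runsFrom_nil l _ (by omega), runsFrom_nil l _ (by omega)]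

-- The combined loop invariant: from position i (1 ≤ i), in each of A's three reachable states,
-- the rest of A's loop appends exactly B's rendered runs from the corresponding position.
theorem main_inv (l : List Char) (k : Nat) : ∀ i acc, l.length - i ≤ k → 1 ≤ i →
    ((l.getD (i-1) ' ' ≠ '-' →
        aLoop l (l.length - 1) i acc 0 false = acc ++ renderF l.length (runsFrom l i)) ∧
     (l.getD (i-1) ' ' = '-' →
        aLoop l (l.length - 1) i acc 0 false
          = acc ++ renderF l.length (runsFrom l (extendRun l (i-1) + 2))) ∧
     (∀ len : Int, l.getD (i-1) ' ' = '-' →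
        aLoop l (l.length - 1) i acc len true
          = acc ++ (if (extendRun l (i-1) : Int) ≤ (l.length : Int) - 3 then
                      [len + ((extendRun l (i-1) : Int) - (i : Int) + 1)] else [])
                ++ renderF l.length (runsFrom l (extendRun l (i-1) + 2)))) := by
  induction k with
  | zero =>
    intro i acc hk hi
    have hni : l.length ≤ i := by omega
    have hstop : ¬ i < l.length - 1 := by omega
    refine ⟨?_, ?_, ?_⟩
    · intro _
      rw [aLoop, if_neg hstop, runsFrom_nil l i hni]; simp [renderF]
    · intro hd
      have := lt_of_getD_dash l (i-1) hd
      have hb := extendRun_ge l (l.length - (i-1)) (i-1) le_rfl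
      rw [aLoop, if_neg hstop, runsFrom_nil l _ (by omega)]; simp [renderF]
    · intro len hd
      have hlt := lt_of_getD_dash l (i-1) hd
      have hb := extendRun_ge l (l.length - (i-1)) (i-1) le_rfl
      have hbl := extendRun_lt l (l.length - (i-1)) (i-1) le_rfl hlt
      have hcut : ¬ ((extendRun l (i-1) : Int) ≤ (l.length : Int) - 3) := by
        have h2 : l.length - 2 ≤ extendRun l (i-1) := by omega
        push_cast at *; omega
      rw [aLoop, if_neg hstop, runsFrom_nil l _ (by omega), if_neg hcut]; simp [renderF]
  | succ k ih =>
    intro i acc hk hi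
    by_cases hstop : i < l.length - 1
    · have hin : i < l.length := by omega
      have hk' : l.length - (i+1) ≤ k := by omega
      refine ⟨?_, ?_, ?_⟩
      · -- OUT state: previous char is not '-'
        intro hprev
        by_cases hc : l.getD i ' ' = '-'
        · -- a genuine run starts at i
          rw [aLoop, if_pos hstop, if_pos ⟨hprev, hc⟩]
          rw [(ih (i+1) acc hk' (by omega)).2.2 1 (by simpa using hc)]
          have hb := extendRun_ge l (l.length - i) i le_rfl
          conv_rhs => rw [runsFrom, if_pos hin, if_pos hc]
          rw [renderF_cons, runsFrom_skip l (extendRun l i) (extendRun_stop' l i)]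
          simp only [Nat.add_sub_cancel]
          by_cases hcut : (extendRun l i : Int) ≤ (l.length : Int) - 3
          · rw [if_pos hcut, if_pos ⟨hi, hcut⟩]
            have hval : (1 : Int) + ((extendRun l i : Int) - ((i : Nat) + 1 : Nat) + 1)
                = (extendRun l i : Int) - (i : Int) + 1 := by push_cast; ring
            rw [hval]; simp
          · rw [if_neg hcut, if_neg (by tauto)]; simp
        · -- ordinary char, stay OUT
          rw [aLoop, if_pos hstop, if_neg (fun h2 => hc h2.2), if_neg (by simp),
              if_neg (by simp)]
          rw [(ih (i+1) acc hk' (by omega)).1 (by simpa using hc)]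
          conv_rhs => rw [runsFrom, if_pos hin, if_neg hc]
      · -- SKIP state: inside the uncounted leading run, flag = false
        intro hprev
        by_cases hc : l.getD i ' ' = '-'
        · rw [aLoop, if_pos hstop, if_neg (fun h2 => h2.1 hprev), if_neg (by simp),
              if_neg (by simp)]
          rw [(ih (i+1) acc hk' (by omega)).2.1 (by simpa using hc)]
          rw [Nat.add_sub_cancel,
              extendRun_step l (i-1) (by omega) (by rwa [Nat.sub_add_cancel hi]),
              Nat.sub_add_cancel hi]
        · rw [aLoop, if_pos hstop, if_neg (fun h2 => hc h2.2), if_neg (by simp),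
              if_neg (by simp)]
          rw [(ih (i+1) acc hk' (by omega)).1 (by simpa using hc)]
          rw [extendRun_fix l (i-1) (by rw [Nat.sub_add_cancel hi]; tauto)]
          have h12 : i - 1 + 2 = i + 1 := by omega
          rw [h12]
      · -- IN state: inside a counted run, flag = true, running length len
        intro len hprev
        by_cases hc : l.getD i ' ' = '-'
        · rw [aLoop, if_pos hstop, if_neg (fun h2 => h2.1 hprev), if_pos ⟨rfl, hc⟩]
          rw [(ih (i+1) acc hk' (by omega)).2.2 (len+1) (by simpa using hc)]
          rw [Nat.add_sub_cancel,
              extendRun_step l (i-1) (by omega) (by rwa [Nat.sub_add_cancel hi]),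
              Nat.sub_add_cancel hi]
          congr 2
          split_ifs with h
          · congr 1; push_cast; ring
          · rfl
        · rw [aLoop, if_pos hstop, if_neg (fun h2 => hc h2.2), if_neg (fun h2 => hc h2.2),
              if_pos ⟨rfl, hc⟩]
          rw [(ih (i+1) (acc ++ [len]) hk' (by omega)).1 (by simpa using hc)]
          rw [extendRun_fix l (i-1) (by rw [Nat.sub_add_cancel hi]; tauto)]
          have hi1 : i - 1 + 1 = i := Nat.sub_add_cancel hi
          have hcut : ((i - 1 : Nat) : Int) ≤ (l.length : Int) - 3 := by
            have h3 : i + 1 < l.length := by omega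
            omega
          rw [if_pos hcut]
          have hv : len + (((i - 1 : Nat) : Int) - (i : Int) + 1) = len := by
            omega
          rw [hv]
          have h2 : i - 1 + 2 = i + 1 := by omega
          rw [h2]
    · -- loop is over (i ≥ n - 1)
      refine ⟨?_, ?_, ?_⟩
      · intro hprev
        rw [aLoop, if_neg hstop]
        by_cases hin : i < l.length
        · -- i = n-1: a run starting here is cut off by the b ≤ n-3 filter
          conv_rhs => rw [runsFrom, if_pos hin]
          by_cases hc : l.getD i ' ' = '-'
          · rw [if_pos hc]
            have hb := extendRun_ge l (l.length - i) i le_rfl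
            have hbl := extendRun_lt l (l.length - i) i le_rfl hin
            rw [renderF_cons, runsFrom_nil l _ (by omega)]
            have hcut : ¬ (1 ≤ i ∧ (extendRun l i : Int) ≤ (l.length : Int) - 3) := by
              have h2 : l.length - 1 ≤ extendRun l i := by omega
              intro hcc
              have := hcc.2
              push_cast at *; omega
            rw [if_neg hcut]; simp [renderF]
          · rw [if_neg hc, runsFrom_nil l _ (by omega)]; simp [renderF]
        · rw [runsFrom_nil l i (by omega)]; simp [renderF]
      · intro hd
        have := lt_of_getD_dash l (i-1) hd
        have hb := extendRun_ge l (l.length - (i-1)) (i-1) le_rfl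
        rw [aLoop, if_neg hstop, runsFrom_nil l _ (by omega)]; simp [renderF]
      · intro len hd
        have hlt := lt_of_getD_dash l (i-1) hd
        have hb := extendRun_ge l (l.length - (i-1)) (i-1) le_rfl
        have hbl := extendRun_lt l (l.length - (i-1)) (i-1) le_rfl hlt
        have hcut : ¬ ((extendRun l (i-1) : Int) ≤ (l.length : Int) - 3) := by
          have h2 : l.length - 2 ≤ i - 1 := by omega
          have h3 : l.length - 2 ≤ extendRun l (i-1) := by omega
          push_cast at *; omega
        rw [aLoop, if_neg hstop, runsFrom_nil l _ (by omega), if_neg hcut]; simp [renderF]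

-- ===== VERDICT (by name: the statement is the Claim_ definition above) =====
theorem extract_insertion_spec : Claim_equal_extract_insertion := by
  intro s _
  unfold Spec_extract_insertion extract_insertion extract_insertion_alt
  set l := s.toList with hl
  show aLoop l (l.length - 1) 1 [] 0 false = renderF l.length (runsFrom l 0)
  by_cases hn : l.length = 0
  · rw [aLoop, if_neg (by omega), runsFrom_nil l 0 (by omega)]; simp [renderF]
  · have hmain := main_inv l l.length 1 [] (by omega) (by omega)
    by_cases h0 : l.getD 0 ' ' = '-'
    · rw [hmain.2.1 h0]
      conv_rhs => rw [runsFrom, if_pos (by omega : (0:Nat) < l.length), if_pos h0]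
      rw [renderF_cons, runsFrom_skip l (extendRun l 0) (extendRun_stop' l 0)]
      rw [if_neg (by omega)]
    · rw [hmain.1 h0]
      conv_rhs => rw [runsFrom, if_pos (by omega : (0:Nat) < l.length), if_neg h0]
      simp
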